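-- pv_equiv track=rewrite | github.com/davidcheungo123/DailyChallenge | DailyChallenge11.py | mostValue
-- ===== SOURCE A (Python) =====
-- def mostValue(strInput):
--     D = {}
--     for counter, strInput in enumerate(strInput):
--         if strInput not in D:
--             D[strInput] = [counter]
--         else:
--             D[strInput].append(counter)
--
--     for key, valueList in D.items():
--         D[key] = valueList[-1] - valueList[0]
--
--     D = dict( sorted(D.items(), key=lambda x: x[0].lower()) )
--
--     return max(D, key=D.get)
-- ===== SOURCE B (Python) =====
-- def mostValue(strInput):
--     first = {}
--     best = None
--     for i, c in enumerate(strInput):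
--         f = first.setdefault(c, i)
--         cand = (f - i, c.lower(), f, c)
--         if best is None or cand < best:
--             best = cand
--     return best[3]
-- ===== Notes on version B (the rewrite author's own statement) =====
-- stated objective: alternative
-- what changed: Replaces A's staged pipeline (dict of position lists, span-rewrite pass, stable sort by lowercase, max scan) by a single streaming pass that memoises each char's first index and keeps a running lexicographic minimum of the composite key (first-last, lower(c), first, c), so no sort, no position lists and no separate max pass exist; the tie-break is encoded in the key comparison instead of the sort order.
import Mathlib
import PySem

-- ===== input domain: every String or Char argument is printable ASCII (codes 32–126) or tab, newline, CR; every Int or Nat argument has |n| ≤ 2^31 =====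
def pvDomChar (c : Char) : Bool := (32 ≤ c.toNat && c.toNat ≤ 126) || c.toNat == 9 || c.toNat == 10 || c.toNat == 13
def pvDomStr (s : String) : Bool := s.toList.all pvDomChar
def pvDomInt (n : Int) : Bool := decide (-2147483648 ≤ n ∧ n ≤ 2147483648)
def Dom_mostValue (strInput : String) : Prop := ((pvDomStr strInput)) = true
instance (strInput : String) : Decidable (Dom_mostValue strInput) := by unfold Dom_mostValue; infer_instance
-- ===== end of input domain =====

-- B replaces A's staged pipeline (dict of position lists, span-rewrite pass, stable sort by
-- lowercase, max scan) by ONE streaming pass keeping a running minimum of a composite key;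
-- objective: alternative (no sort, no position lists, single pass).

-- ===== PORT A =====
-- Python A: dict char -> list of positions, then rewrite each value to last-first,
-- then rebuild the dict sorted by the key's lowercase, then max(D, key=D.get).
-- The in-place value rewrite keeps the key order, modelled by re-inserting the items
-- (distinct keys) into an empty dict in order; `x[0].lower()` on a single ASCII char
-- (Dom guarantees ASCII) is PySem.Chars.lowerChar; max over an empty dict raises
-- ValueError, excluded by Pre_ (the port returns "" there, nothing is claimed).
def mostValue (strInput : String) : String :=
  let s := strInput.toList
  let D : PySem.Dict Char (List Int) :=
    (PySem.List.enumerate s 0).foldl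
      (fun d p =>
        if d.contains p.2 = false then d.insert p.2 [p.1]
        else d.insert p.2 (d.getD p.2 [] ++ [p.1]))
      PySem.Dict.empty
  let D2 : PySem.Dict Char Int :=
    D.items.foldl
      (fun d p => d.insert p.1 (PySem.List.pyGetD p.2 (-1) 0 - PySem.List.pyGetD p.2 0 0))
      PySem.Dict.empty
  let D3 : PySem.Dict Char Int :=
    PySem.Dict.mk (PySem.List.sorted D2.items (fun x => PySem.Chars.lowerChar x.1) false)
  match PySem.List.max? D3.keys (fun k => D3.getD k 0) with
  | some c => String.ofList [c]
  | none => ""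

-- ===== PORT B =====
-- Source B: one pass over enumerate(strInput); first.setdefault(c, i) memoises the first
-- index of c; cand = (f - i, c.lower(), f, c) and best = running minimum of cand under
-- Python's lexicographic tuple '<'; return best[3].  candLt is that tuple comparison:
-- the str components are single ASCII chars (Dom), where str '<' agrees with Char '<'.
def candLt (a b : Int × Char × Int × Char) : Bool :=
  decide (a.1 < b.1) || (a.1 == b.1 &&
    (decide (a.2.1 < b.2.1) || (a.2.1 == b.2.1 &&
      (decide (a.2.2.1 < b.2.2.1) || (a.2.2.1 == b.2.2.1 &&
        decide (a.2.2.2 < b.2.2.2))))))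

def mostValue_alt (strInput : String) : String :=
  let s := strInput.toList
  let r := (PySem.List.enumerate s 0).foldl
    (fun (st : PySem.Dict Char Int × Option (Int × Char × Int × Char)) p =>
      -- f = first.setdefault(c, i): the stored first index, inserting i if absent
      let f := st.1.getD p.2 p.1
      let d := if st.1.contains p.2 then st.1 else st.1.insert p.2 p.1
      let cand := (f - p.1, PySem.Chars.lowerChar p.2, f, p.2)
      let best := match st.2 with
        | none => some cand
        | some b => if candLt cand b then some cand else some b
      (d, best))
    (PySem.Dict.empty, none)
  match r.2 with
  | some b => String.ofList [b.2.2.2]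
  | none => ""   -- unreachable under Pre_: Python B raises TypeError on the empty string

-- ===== PRECONDITION & SPEC =====
-- Pre_ excludes only the empty string, on which A raises ValueError (max of an empty dict).
def Pre_mostValue (strInput : String) : Prop := strInput ≠ ""
instance (strInput : String) : Decidable (Pre_mostValue strInput) := by unfold Pre_mostValue; infer_instance
def pvWitness_mostValue : String := "abAcba"

def Spec_mostValue (strInput : String) (out : String) : Prop := out = mostValue_alt strInput
instance (strInput : String) (out : String) : Decidable (Spec_mostValue strInput out) := by unfold Spec_mostValue; infer_instance

-- ===== CLAIM (what is proved, stated in full; the proofs are below) =====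
def Claim_equal_mostValue : Prop := ∀ (strInput : String), Dom_mostValue strInput → Pre_mostValue strInput → Spec_mostValue strInput (mostValue strInput)

-- ===== LEMMAS AND PROOFS =====

-- positions of c in s, as naturals, and as Python ints
def posN (s : List Char) (c : Char) : List Nat :=
  (List.range s.length).filter (fun j => s[j]? == some c)

def posI (s : List Char) (c : Char) : List Int :=
  List.map (fun j : Nat => (j : Int)) (posN s c)

-- first index, last index and span of a char, as A computes them
def firstI (s : List Char) (c : Char) : Int := PySem.List.pyGetD (posI s c) 0 0
def lastI (s : List Char) (c : Char) : Int := PySem.List.pyGetD (posI s c) (-1) 0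
def spanOf (s : List Char) (c : Char) : Int := lastI s c - firstI s c

-- B's candidate key for char c, taken at its last occurrence
def keyCand (s : List Char) (c : Char) : Int × Char × Int × Char :=
  (firstI s c - lastI s c, PySem.Chars.lowerChar c, firstI s c, c)

-- the tie-break order underlying A's stable sort: lowercase, then first appearance
def tb (s : List Char) (a b : Char) : Prop :=
  PySem.Chars.lowerChar a < PySem.Chars.lowerChar b ∨
    (PySem.Chars.lowerChar a = PySem.Chars.lowerChar b ∧ firstI s a < firstI s b)

-- "m beats x" in A's max: larger span, or equal span and earlier in the sorted order
def KltP (s : List Char) (m x : Char) : Prop :=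
  spanOf s x < spanOf s m ∨ (spanOf s x = spanOf s m ∧ tb s m x)

theorem mem_posN {s : List Char} {c : Char} {j : Nat} :
    j ∈ posN s c ↔ j < s.length ∧ s[j]? = some c := by
  simp [posN]

theorem posN_ne_nil {s : List Char} {c : Char} (h : c ∈ s) : posN s c ≠ [] := by
  obtain ⟨j, hg⟩ := List.mem_iff_getElem?.mp h
  have hj : j < s.length := (List.getElem?_eq_some_iff.mp hg).1
  exact List.ne_nil_of_mem (mem_posN.mpr ⟨hj, hg⟩)

theorem posN_eq_nil_of_not_mem {s : List Char} {x : Char} (h : x ∉ s) : posN s x = [] := by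
  unfold posN
  rw [List.filter_eq_nil_iff]
  intro j hj
  simp only [beq_iff_eq]
  intro hg
  exact h (List.mem_of_getElem? hg)

theorem posN_append_singleton (s : List Char) (x c : Char) :
    posN (s ++ [x]) c = posN s c ++ (if x = c then [s.length] else []) := by
  unfold posN
  rw [List.length_append, List.length_singleton, List.range_succ, List.filter_append]
  congr 1
  · apply List.filter_congr
    intro j hj
    rw [List.mem_range] at hj
    rw [List.getElem?_append_left hj]
  · by_cases hx : x = c <;> simp [hx]

theorem posI_append_singleton (s : List Char) (x c : Char) :
    posI (s ++ [x]) c = posI s c ++ (if x = c then [(s.length : Int)] else []) := by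
  unfold posI
  rw [posN_append_singleton, List.map_append]
  congr 1
  by_cases hx : x = c <;> simp [hx]

theorem posN_pairwise (s : List Char) (c : Char) : (posN s c).Pairwise (· < ·) :=
  (List.pairwise_lt_range).filter _

theorem mem_le_getLast {l : List Nat} (hp : l.Pairwise (· < ·)) (hne : l ≠ [])
    {x : Nat} (hx : x ∈ l) : x ≤ l.getLast hne := by
  induction l with
  | nil => simp at hx
  | cons a t ih =>
    cases t with
    | nil => simp at hx; simp [hx, List.getLast]
    | cons b u =>
      rw [List.getLast_cons (by simp)]
      rcases List.mem_cons.mp hx with h1 | h1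
      · subst h1
        have hbu : b :: u ≠ [] := by simp
        have hlt : x < (b::u).getLast hbu :=
          (List.pairwise_cons.mp hp).1 _ (List.getLast_mem hbu)
        omega
      · exact ih (List.pairwise_cons.mp hp).2 (by simp) h1

-- the first index is the head of posN
theorem firstI_spec {s : List Char} {c : Char} (h : c ∈ s) :
    ∃ j : Nat, j ∈ posN s c ∧ (posN s c).head? = some j ∧ firstI s c = (j : Int) := by
  have hne := posN_ne_nil h
  cases hp : posN s c with
  | nil => exact absurd hp hne
  | cons j t =>
    refine ⟨j, by simp, by simp, ?_⟩

    unfold firstI posI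
    rw [hp]
    simp [PySem.List.pyGetD_zero]

-- the last index is the greatest element of posN
theorem lastI_spec {s : List Char} {c : Char} (h : c ∈ s) :
    ∃ j : Nat, j ∈ posN s c ∧ lastI s c = (j : Int) ∧ ∀ i ∈ posN s c, i ≤ j := by
  have hne := posN_ne_nil h
  have hneI : posI s c ≠ [] := by
    unfold posI; simpa using hne
  refine ⟨(posN s c).getLast hne, List.getLast_mem hne, ?_,
    fun i hi => mem_le_getLast (posN_pairwise s c) hne hi⟩
  unfold lastI
  rw [PySem.List.pyGetD_neg_one _ _ hneI]
  unfold posI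
  rw [List.getLast_map]

theorem firstI_lt_length {s : List Char} {c : Char} (h : c ∈ s) :
    firstI s c < (s.length : Int) := by
  obtain ⟨j, hj, _, he⟩ := firstI_spec h
  rw [he]
  exact_mod_cast (mem_posN.mp hj).1

theorem firstI_append {s : List Char} (x : Char) {c : Char} (h : c ∈ s) :
    firstI (s ++ [x]) c = firstI s c := by
  unfold firstI
  rw [posI_append_singleton, PySem.List.pyGetD_zero, PySem.List.pyGetD_zero]
  cases hp : posN s c with
  | nil => exact absurd hp (posN_ne_nil h)
  | cons j t => simp [posI, hp]

theorem firstI_append_new {s : List Char} {x : Char} (h : x ∉ s) :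
    firstI (s ++ [x]) x = (s.length : Int) := by
  unfold firstI
  rw [posI_append_singleton, PySem.List.pyGetD_zero]
  simp [posI, posN_eq_nil_of_not_mem h]

theorem firstI_inj {s : List Char} {a b : Char} (ha : a ∈ s) (hb : b ∈ s)
    (h : firstI s a = firstI s b) : a = b := by
  obtain ⟨ja, hja, _, hea⟩ := firstI_spec ha
  obtain ⟨jb, hjb, _, heb⟩ := firstI_spec hb
  rw [hea, heb] at h
  have hj : ja = jb := by exact_mod_cast h
  subst hj
  have h1 := (mem_posN.mp hja).2
  have h2 := (mem_posN.mp hjb).2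
  rw [h1] at h2
  exact Option.some_inj.mp h2

theorem dedup_append_singleton (s : List Char) (x : Char) :
    PySem.List.dedup (s ++ [x]) =
      if x ∈ s then PySem.List.dedup s else PySem.List.dedup s ++ [x] := by
  simp only [PySem.List.dedup_eq_ofList, PySem.Set.ofList, List.foldl_append,
    List.foldl_cons, List.foldl_nil]
  rw [PySem.Set.add]
  by_cases hx : x ∈ s
  · simp [hx]
    exact (PySem.Set.mem_ofList s x).mpr hx
  · simp [hx]
    exact fun hm => hx ((PySem.Set.mem_ofList s x).mp hm)

-- dedup lists chars in strictly increasing order of first appearance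
theorem dedup_pairwise_firstI (s : List Char) :
    (PySem.List.dedup s).Pairwise (fun a b => firstI s a < firstI s b) := by
  induction s using List.reverseRecOn with
  | nil => simp [PySem.List.dedup_eq_ofList, PySem.Set.ofList]
  | append_singleton s x ih =>
    rw [dedup_append_singleton]
    by_cases hx : x ∈ s
    · rw [if_pos hx]
      refine ih.imp_of_mem ?_
      intro a b hma hmb hlt
      have ha : a ∈ s := (PySem.List.mem_dedup s a).mp hma
      have hb : b ∈ s := (PySem.List.mem_dedup s b).mp hmb
      rw [firstI_append x ha, firstI_append x hb]
      exact hlt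
    · rw [if_neg hx, List.pairwise_append]
      refine ⟨ih.imp_of_mem ?_, by simp, ?_⟩
      · intro a b hma hmb hlt
        have ha : a ∈ s := (PySem.List.mem_dedup s a).mp hma
        have hb : b ∈ s := (PySem.List.mem_dedup s b).mp hmb
        rw [firstI_append x ha, firstI_append x hb]
        exact hlt
      · intro a hma b hmb
        rw [List.mem_singleton] at hmb
        subst hmb
        have ha : a ∈ s := (PySem.List.mem_dedup s a).mp hma
        rw [firstI_append b ha, firstI_append_new hx]
        exact firstI_lt_length ha

-- ---------- A side ----------

-- A's first loop, named
def stepA (d : PySem.Dict Char (List Int)) (p : Int × Char) : PySem.Dict Char (List Int) :=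
  if d.contains p.2 = false then d.insert p.2 [p.1]
  else d.insert p.2 (d.getD p.2 [] ++ [p.1])

theorem stepA_eq_modify : stepA = fun d p => d.modify p.2 [] (· ++ [p.1]) := by
  funext d p
  by_cases h : d.contains p.2 = true
  · simp [stepA, PySem.Dict.modify, h]
  · rw [Bool.not_eq_true] at h
    simp [stepA, PySem.Dict.modify, h, PySem.Dict.getD_of_not_contains d _ h]

-- A's first loop builds, in first-appearance order, the full position lists
theorem itemsA (s : List Char) :
    ((PySem.List.enumerate s 0).foldl stepA PySem.Dict.empty).items
      = (PySem.List.dedup s).map (fun c => (c, posI s c)) := by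
  induction s using List.reverseRecOn with
  | nil => rfl
  | append_singleton s x ih =>
    rw [PySem.List.enumerate_append, PySem.List.enumerate_cons]
    simp only [PySem.List.enumerate_nil, List.foldl_append, List.foldl_cons, List.foldl_nil,
      zero_add]
    set D := (PySem.List.enumerate s 0).foldl stepA PySem.Dict.empty with hD
    have hkeys : D.keys = PySem.List.dedup s := by
      rw [PySem.Dict.keys, ih, List.map_map]
      simp [Function.comp_def]
    rw [stepA_eq_modify]
    simp only [PySem.Dict.modify]
    by_cases hx : x ∈ s
    · have hc : D.contains x = true :=
        (PySem.Dict.contains_iff_mem_keys D x).mpr (hkeys ▸ (PySem.List.mem_dedup s x).mpr hx)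
      have hgd : D.getD x [] = posI s x := by
        apply PySem.Dict.getD_of_mem_items
        · rw [ih]
          exact List.mem_map_of_mem ((PySem.List.mem_dedup s x).mpr hx)
        · rw [hkeys]; exact PySem.List.nodup_dedup s
      rw [PySem.Dict.items_insert_of_contains _ _ hc, ih, dedup_append_singleton,
        if_pos hx, List.map_map]
      apply List.map_congr_left
      intro c hc'
      by_cases hcx : c = x
      · subst hcx
        simp [hgd, posI_append_singleton]
      · have hbx : (c == x) = false := by simp [hcx]
        simp only [Function.comp_apply, hbx, Bool.false_eq_true, if_false,
          posI_append_singleton]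
        have hxc : ¬ x = c := fun e => hcx e.symm
        simp [hxc]
    · have hc : D.contains x = false := by
        rw [← Bool.not_eq_true, PySem.Dict.contains_iff_mem_keys, hkeys]
        exact fun hm => hx ((PySem.List.mem_dedup s x).mp hm)
      rw [PySem.Dict.items_insert_of_not_contains _ _ hc,
        PySem.Dict.getD_of_not_contains _ _ hc, ih, dedup_append_singleton, if_neg hx,
        List.map_append]
      congr 1
      · apply List.map_congr_left
        intro c hc'
        have hcs : c ∈ s := (PySem.List.mem_dedup s c).mp hc'
        have hxc : ¬ x = c := fun e => hx (e ▸ hcs)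
        simp [posI_append_singleton, hxc]
      · rw [List.map_singleton, posI_append_singleton, if_pos rfl]
        unfold posI
        rw [posN_eq_nil_of_not_mem hx]
        simp

-- A's second loop: re-inserting distinct keys into an empty dict keeps the item order
theorem itemsFold {κ ν μ : Type} [BEq κ] [LawfulBEq κ] (f : κ × ν → μ) :
    ∀ l : List (κ × ν), (l.map Prod.fst).Nodup →
      ((l.foldl (fun d p => d.insert p.1 (f p)) PySem.Dict.empty).items
        = l.map (fun p => (p.1, f p))) := by
  intro l
  induction l using List.reverseRecOn with
  | nil => intro _; rfl
  | append_singleton l q ih =>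
    intro hnd
    rw [List.foldl_append, List.foldl_cons, List.foldl_nil]
    have hnd' : (l.map Prod.fst).Nodup := by
      rw [List.map_append] at hnd; exact (List.nodup_append.mp hnd).1
    have hitems := ih hnd'
    have hkeys : (l.foldl (fun d p => d.insert p.1 (f p)) PySem.Dict.empty).keys
        = l.map Prod.fst := by
      rw [PySem.Dict.keys, hitems, List.map_map]; rfl
    have hq : q.1 ∉ l.map Prod.fst := by
      rw [List.map_append] at hnd
      have h3 := List.nodup_append.mp hnd
      intro hm
      have hmem : q.1 ∈ List.map Prod.fst [q] := by simp
      exact h3.2.2 _ hm _ hmem rfl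
    have hc : (l.foldl (fun d p => d.insert p.1 (f p)) PySem.Dict.empty).contains q.1 = false := by
      rw [← Bool.not_eq_true]
      rw [PySem.Dict.contains_iff_mem_keys, hkeys]
      exact hq
    rw [PySem.Dict.items_insert_of_not_contains _ _ hc, hitems, List.map_append]
    rfl

-- sorting by a key of the first component commutes with projecting first components
theorem insertBy_map_fst {α β γ : Type} (g : α → β) [LT β] [DecidableLT β]
    (x : α × γ) (ys : List (α × γ)) :
    (PySem.List.insertBy (fun a b => decide (g a.1 < g b.1)) x ys).map Prod.fst
      = PySem.List.insertBy (fun a b => decide (g a < g b)) x.1 (ys.map Prod.fst) := by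
  induction ys with
  | nil => rfl
  | cons y t ih =>
    rw [PySem.List.insertBy, List.map_cons, PySem.List.insertBy]
    by_cases h : g x.1 < g y.1
    · simp [h]
    · simp only [h, decide_false, Bool.false_eq_true, if_false, List.map_cons, ih]

theorem sorted_map_fst {α β γ : Type} (g : α → β) [LT β] [DecidableLT β] (l : List (α × γ)) :
    (PySem.List.sorted l (fun p => g p.1) false).map Prod.fst
      = PySem.List.sorted (l.map Prod.fst) g false := by
  rw [PySem.List.sorted_eq_foldl_insertBy, PySem.List.sorted_eq_foldl_insertBy]
  suffices h : ∀ (acc : List (α × γ)),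
      (l.foldl (fun acc x => PySem.List.insertBy (fun a b => decide (g a.1 < g b.1)) x acc) acc).map Prod.fst
        = (l.map Prod.fst).foldl (fun acc x => PySem.List.insertBy (fun a b => decide (g a < g b)) x acc) (acc.map Prod.fst) by
    exact h []
  induction l with
  | nil => intro acc; rfl
  | cons y t ih =>
    intro acc
    rw [List.foldl_cons, List.map_cons, List.foldl_cons, ih, insertBy_map_fst]

-- Python's first-maximum only looks at key values of members
theorem max?_congr {α : Type} (l : List α) (f g : α → Int)
    (h : ∀ x ∈ l, f x = g x) : PySem.List.max? l f = PySem.List.max? l g := by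
  unfold PySem.List.max?
  suffices hs : ∀ acc : Option α, (∀ m, acc = some m → f m = g m) →
      l.foldl (fun acc x => match acc with
        | none => some x
        | some m => if f m < f x then some x else some m) acc
      = l.foldl (fun acc x => match acc with
        | none => some x
        | some m => if g m < g x then some x else some m) acc by
    exact hs none (by simp)
  induction l with
  | nil => intro acc _; rfl
  | cons y t ih =>
    intro acc hacc
    rw [List.foldl_cons, List.foldl_cons]
    have hy : f y = g y := h y (by simp)
    cases acc with
    | none =>
      apply ih (fun x hx => h x (List.mem_cons_of_mem _ hx))
      intro m hm
      cases hm
      exact hy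
    | some m =>
      have hfm : f m = g m := hacc m rfl
      simp only [hfm, hy]
      apply ih (fun x hx => h x (List.mem_cons_of_mem _ hx))
      intro m' hm'
      split at hm'
      · cases hm'; exact hy
      · cases hm'; exact hfm

def sortedSpans (s : List Char) : List (Char × Int) :=
  PySem.List.sorted ((PySem.List.dedup s).map (fun c => (c, spanOf s c)))
    (fun x => PySem.Chars.lowerChar x.1) false

-- the lowercase-sorted span dict equals the sorted char list with spanOf as values
theorem main_eq (s : List Char) :
    PySem.List.max? (PySem.Dict.mk (sortedSpans s)).keys
      (fun k => (PySem.Dict.mk (sortedSpans s)).getD k 0)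
    = PySem.List.max? (PySem.List.sorted (PySem.List.dedup s) PySem.Chars.lowerChar false)
      (fun c => spanOf s c) := by
  have hkeys : (PySem.Dict.mk (sortedSpans s)).keys
      = PySem.List.sorted (PySem.List.dedup s) PySem.Chars.lowerChar false := by
    rw [PySem.Dict.keys]
    show (sortedSpans s).map Prod.fst = _
    rw [sortedSpans, sorted_map_fst]
    congr 1
    rw [List.map_map]
    simp [Function.comp_def]
  rw [hkeys]
  apply max?_congr
  intro c hc
  have hcU : c ∈ PySem.List.dedup s := (PySem.List.mem_sorted _ _ _ _).mp hc
  have hmem : (c, spanOf s c) ∈ sortedSpans s := by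
    rw [sortedSpans, PySem.List.mem_sorted]
    exact List.mem_map_of_mem hcU
  have hnd : (PySem.Dict.mk (sortedSpans s)).keys.Nodup := by
    rw [hkeys]
    exact ((PySem.List.sorted_perm _ _ _).symm).nodup (PySem.List.nodup_dedup s)
  rw [PySem.Dict.getD_of_mem_items (PySem.Dict.mk (sortedSpans s)) hmem hnd 0]

-- A reduced: first maximum of the span over the lowercase-sorted dedup list
theorem A_reduce (strInput : String) :
    mostValue strInput =
      match PySem.List.max?
          (PySem.List.sorted (PySem.List.dedup strInput.toList) PySem.Chars.lowerChar false)
          (fun c => spanOf strInput.toList c) with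
      | some c => String.ofList [c]
      | none => "" := by
  unfold mostValue
  dsimp only
  rw [show (fun (d : PySem.Dict Char (List Int)) (p : Int × Char) =>
      if d.contains p.2 = false then d.insert p.2 [p.1]
      else d.insert p.2 (d.getD p.2 [] ++ [p.1])) = stepA from rfl]
  rw [itemsA]
  rw [itemsFold (fun p : Char × List Int =>
      PySem.List.pyGetD p.2 (-1) 0 - PySem.List.pyGetD p.2 0 0) _
      (by rw [List.map_map]
          simp only [Function.comp_def]
          rw [List.map_id']
          exact PySem.List.nodup_dedup strInput.toList)]
  rw [List.map_map]
  simp only [Function.comp_def]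
  rw [show PySem.List.sorted
      (List.map (fun x => (x, PySem.List.pyGetD (posI strInput.toList x) (-1) 0 -
        PySem.List.pyGetD (posI strInput.toList x) 0 0)) (PySem.List.dedup strInput.toList))
      (fun x => PySem.Chars.lowerChar x.1) false = sortedSpans strInput.toList from rfl]
  rw [main_eq strInput.toList]

-- tb is asymmetric
theorem tb_asymm {s : List Char} {a b : Char} (h : tb s a b) : ¬ tb s b a := by
  intro h2
  rcases h with h | ⟨he, hf⟩ <;> rcases h2 with h2 | ⟨he2, hf2⟩
  · exact absurd h2 (lt_asymm h)
  · rw [he2] at h; exact lt_irrefl _ h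
  · rw [he] at h2; exact lt_irrefl _ h2
  · omega

-- stability: inserting by lowercase keeps tb-pairwise when the new char appears later
theorem insertBy_pairwise_tb (s : List Char) (x : Char) :
    ∀ acc : List Char, acc.Pairwise (tb s) → (∀ y ∈ acc, firstI s y < firstI s x) →
      (PySem.List.insertBy (fun a b => decide (PySem.Chars.lowerChar a < PySem.Chars.lowerChar b)) x acc).Pairwise (tb s) := by
  intro acc
  induction acc with
  | nil => intro _ _; simp [PySem.List.insertBy]
  | cons y t ih =>
    intro hp hf
    rw [PySem.List.insertBy]
    by_cases hlt : PySem.Chars.lowerChar x < PySem.Chars.lowerChar y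
    · simp only [hlt, decide_true, if_true]
      apply List.pairwise_cons.mpr
      refine ⟨?_, hp⟩
      intro z hz
      rcases List.mem_cons.mp hz with rfl | hzt
      · exact Or.inl hlt
      · rcases (List.pairwise_cons.mp hp).1 z hzt with h | ⟨he, _⟩
        · exact Or.inl (lt_trans hlt h)
        · exact Or.inl (he ▸ hlt)
    · simp only [hlt, decide_false, Bool.false_eq_true, if_false]
      apply List.pairwise_cons.mpr
      refine ⟨?_, ih (List.pairwise_cons.mp hp).2
        (fun z hz => hf z (List.mem_cons_of_mem _ hz))⟩
      intro z hz
      rcases (PySem.List.mem_insertBy _ _ _ _).mp hz with rfl | hzt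
      · rcases lt_or_eq_of_le (le_of_not_gt hlt) with h | h
        · exact Or.inl h
        · exact Or.inr ⟨h, hf y (List.mem_cons_self)⟩
      · exact (List.pairwise_cons.mp hp).1 z hzt

theorem sorted_pairwise_tb (s : List Char) (l : List Char)
    (h : l.Pairwise (fun a b => firstI s a < firstI s b)) :
    (PySem.List.sorted l PySem.Chars.lowerChar false).Pairwise (tb s) := by
  rw [PySem.List.sorted_eq_foldl_insertBy]
  suffices haux : ∀ (l acc : List Char), l.Pairwise (fun a b => firstI s a < firstI s b) →
      acc.Pairwise (tb s) → (∀ y ∈ acc, ∀ z ∈ l, firstI s y < firstI s z) →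
      (l.foldl (fun acc x => PySem.List.insertBy
        (fun a b => decide (PySem.Chars.lowerChar a < PySem.Chars.lowerChar b)) x acc) acc).Pairwise (tb s) by
    exact haux l [] h (by simp) (by simp)
  intro l
  induction l with
  | nil => intro acc _ hacc _; exact hacc
  | cons x t ih =>
    intro acc hp hacc hcross
    rw [List.foldl_cons]
    apply ih _ (List.pairwise_cons.mp hp).2
      (insertBy_pairwise_tb s x acc hacc (fun y hy => hcross y hy x List.mem_cons_self))
    intro y hy z hz
    rcases (PySem.List.mem_insertBy _ _ _ _).mp hy with rfl | hya
    · exact (List.pairwise_cons.mp hp).1 z hz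
    · exact hcross y hya z (List.mem_cons_of_mem _ hz)

def stepMax (s : List Char) (acc : Option Char) (x : Char) : Option Char :=
  match acc with
  | none => some x
  | some m => if spanOf s m < spanOf s x then some x else some m

-- the first maximum of the span over a tb-sorted list beats every other element
theorem max_fold_char (s : List Char) :
    ∀ (l : List Char) (a m : Char), l.Pairwise (tb s) → (∀ x ∈ l, tb s a x) →
      l.foldl (stepMax s) (some a) = some m →
      (m = a ∨ m ∈ l) ∧ (∀ x, (x = a ∨ x ∈ l) → x ≠ m → KltP s m x) := by
  intro l
  induction l with
  | nil =>
    intro a m _ _ hfold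
    rw [List.foldl_nil] at hfold
    have hma : m = a := Option.some_inj.mp hfold.symm
    subst hma
    refine ⟨Or.inl rfl, ?_⟩
    rintro x (rfl | hx) hne
    · exact absurd rfl hne
    · simp at hx
  | cons b t ih =>
    intro a m hp hall hfold
    rw [List.foldl_cons] at hfold
    by_cases hab : spanOf s a < spanOf s b
    · rw [show stepMax s (some a) b = some b by simp [stepMax, hab]] at hfold
      obtain ⟨hm, hall'⟩ := ih b m (List.pairwise_cons.mp hp).2
        (List.pairwise_cons.mp hp).1 hfold
      have hbm : spanOf s b ≤ spanOf s m := by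
        rcases hm with rfl | hmt
        · exact le_refl _
        · by_cases hbm' : b = m
          · exact hbm' ▸ le_refl _
          · rcases hall' b (Or.inl rfl) hbm' with h | ⟨h, _⟩ <;> omega
      refine ⟨Or.inr ?_, ?_⟩
      · rcases hm with rfl | hmt
        · exact List.mem_cons_self
        · exact List.mem_cons_of_mem _ hmt
      · rintro x (rfl | hx) hne
        · exact Or.inl (by omega)
        · rcases List.mem_cons.mp hx with rfl | hxt
          · exact hall' x (Or.inl rfl) hne
          · exact hall' x (Or.inr hxt) hne
    · rw [show stepMax s (some a) b = some a by simp [stepMax, hab]] at hfold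
      have hba : spanOf s b ≤ spanOf s a := le_of_not_gt hab
      obtain ⟨hm, hall'⟩ := ih a m (List.pairwise_cons.mp hp).2
        (fun x hx => hall x (List.mem_cons_of_mem _ hx)) hfold
      refine ⟨?_, ?_⟩
      · rcases hm with rfl | hmt
        · exact Or.inl rfl
        · exact Or.inr (List.mem_cons_of_mem _ hmt)
      · rintro x (rfl | hx) hne
        · exact hall' x (Or.inl rfl) hne
        · rcases List.mem_cons.mp hx with rfl | hxt
          · -- x = b
            rcases hm with rfl | hmt
            · -- m = a
              rcases lt_or_eq_of_le hba with h | h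
              · exact Or.inl h
              · exact Or.inr ⟨h, hall x List.mem_cons_self⟩
            · -- m ∈ t
              have htbam : tb s a m := hall m (List.mem_cons_of_mem _ hmt)
              have hma : m ≠ a := by
                rintro rfl
                rcases htbam with h | ⟨_, h⟩
                · exact lt_irrefl _ h
                · omega
              rcases hall' a (Or.inl rfl) (fun e => hma e.symm) with h | ⟨h, htb⟩
              · exact Or.inl (by omega)
              · exact absurd htb (tb_asymm htbam)
          · exact hall' x (Or.inr hxt) hne

theorem max?_eq_foldl_stepMax (s : List Char) (l : List Char) :
    PySem.List.max? l (fun c => spanOf s c) = l.foldl (stepMax s) none := by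
  unfold PySem.List.max?
  congr 1
  funext acc x
  cases acc <;> rfl

theorem maxA_char {s : List Char} {l : List Char} {m : Char}
    (hp : l.Pairwise (tb s))
    (h : PySem.List.max? l (fun c => spanOf s c) = some m) :
    m ∈ l ∧ ∀ x ∈ l, x ≠ m → KltP s m x := by
  cases l with
  | nil => simp [PySem.List.max?] at h
  | cons c t =>
    rw [max?_eq_foldl_stepMax, List.foldl_cons] at h
    rw [show stepMax s none c = some c from rfl] at h
    obtain ⟨hm, hall⟩ := max_fold_char s t c m (List.pairwise_cons.mp hp).2
      (List.pairwise_cons.mp hp).1 h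
    refine ⟨?_, ?_⟩
    · rcases hm with rfl | hmt
      · exact List.mem_cons_self
      · exact List.mem_cons_of_mem _ hmt
    · intro x hx hne
      rcases List.mem_cons.mp hx with rfl | hxt
      · exact hall x (Or.inl rfl) hne
      · exact hall x (Or.inr hxt) hne

-- ---------- B side ----------

-- B's loop body, named
def stepB (st : PySem.Dict Char Int × Option (Int × Char × Int × Char)) (p : Int × Char) :
    PySem.Dict Char Int × Option (Int × Char × Int × Char) :=
  let f := st.1.getD p.2 p.1
  let d := if st.1.contains p.2 then st.1 else st.1.insert p.2 p.1
  let cand := (f - p.1, PySem.Chars.lowerChar p.2, f, p.2)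
  let best := match st.2 with
    | none => some cand
    | some b => if candLt cand b then some cand else some b
  (d, best)

def stepMin (acc : Option (Int × Char × Int × Char)) (x : Int × Char × Int × Char) :
    Option (Int × Char × Int × Char) :=
  match acc with
  | none => some x
  | some m => if candLt x m then some x else some m

def minF (l : List (Int × Char × Int × Char)) : Option (Int × Char × Int × Char) :=
  l.foldl stepMin none

-- all candidates generated by B's pass
def cands (s : List Char) : List (Int × Char × Int × Char) :=
  (PySem.List.enumerate s 0).map
    (fun p => (firstI s p.2 - p.1, PySem.Chars.lowerChar p.2, firstI s p.2, p.2))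

theorem dict_ext {κ ν : Type} [BEq κ] {d e : PySem.Dict κ ν} (h : d.items = e.items) :
    d = e := by
  cases d
  cases e
  simpa [PySem.Dict.items] using h

theorem stepB_eq (st : PySem.Dict Char Int × Option (Int × Char × Int × Char))
    (p : Int × Char) :
    stepB st p = (if st.1.contains p.2 then st.1 else st.1.insert p.2 p.1,
      stepMin st.2 (st.1.getD p.2 p.1 - p.1, PySem.Chars.lowerChar p.2, st.1.getD p.2 p.1, p.2)) := by
  unfold stepB stepMin
  cases st.2 <;> rfl

theorem cands_append (s : List Char) (x : Char) :
    cands (s ++ [x]) = cands s ++ [(firstI (s ++ [x]) x - (s.length : Int),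
      PySem.Chars.lowerChar x, firstI (s ++ [x]) x, x)] := by
  unfold cands
  rw [PySem.List.enumerate_append, PySem.List.enumerate_cons, PySem.List.enumerate_nil,
    List.map_append]
  congr 1
  · apply List.map_congr_left
    intro p hp
    obtain ⟨k, hklt, rfl⟩ := (PySem.List.mem_enumerate_iff _ _ _).mp hp
    have hmem : (((0 : Int) + (k : Int), s[k]) : Int × Char).2 ∈ s := List.getElem_mem hklt
    rw [firstI_append x hmem]
  · simp

theorem foldB (s : List Char) :
    (PySem.List.enumerate s 0).foldl stepB (PySem.Dict.empty, none)
      = (PySem.Dict.mk ((PySem.List.dedup s).map (fun c => (c, firstI s c))), minF (cands s)) := by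
  induction s using List.reverseRecOn with
  | nil => rfl
  | append_singleton s x ih =>
    rw [PySem.List.enumerate_append, List.foldl_append, ih, PySem.List.enumerate_cons,
      PySem.List.enumerate_nil, List.foldl_cons, List.foldl_nil, cands_append, stepB_eq]
    have hminapp : minF (cands s ++ [(firstI (s ++ [x]) x - (s.length : Int),
        PySem.Chars.lowerChar x, firstI (s ++ [x]) x, x)])
        = stepMin (minF (cands s)) (firstI (s ++ [x]) x - (s.length : Int),
          PySem.Chars.lowerChar x, firstI (s ++ [x]) x, x) := by
      unfold minF
      rw [List.foldl_append, List.foldl_cons, List.foldl_nil]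
    rw [hminapp]
    have hitems : (PySem.Dict.mk ((PySem.List.dedup s).map (fun c => (c, firstI s c)))).items
        = (PySem.List.dedup s).map (fun c => (c, firstI s c)) := rfl
    have hkeys : (PySem.Dict.mk ((PySem.List.dedup s).map (fun c => (c, firstI s c)))).keys
        = PySem.List.dedup s := by
      rw [PySem.Dict.keys, hitems, List.map_map]
      simp [Function.comp_def]
    by_cases hx : x ∈ s
    · have hcont : (PySem.Dict.mk ((PySem.List.dedup s).map (fun c => (c, firstI s c)))).contains x = true := by
        rw [PySem.Dict.contains_iff_mem_keys, hkeys]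
        exact (PySem.List.mem_dedup s x).mpr hx
      have hnd : (PySem.Dict.mk ((PySem.List.dedup s).map (fun c => (c, firstI s c)))).keys.Nodup := by
        rw [hkeys]; exact PySem.List.nodup_dedup s
      have hgd : ∀ dflt : Int,
          (PySem.Dict.mk ((PySem.List.dedup s).map (fun c => (c, firstI s c)))).getD x dflt = firstI s x := by
        intro dflt
        have hmemit : (x, firstI s x) ∈ (PySem.List.dedup s).map (fun c => (c, firstI s c)) :=
          List.mem_map_of_mem ((PySem.List.mem_dedup s x).mpr hx)
        exact PySem.Dict.getD_of_mem_items _ hmemit hnd dflt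
      have hfx : firstI (s ++ [x]) x = firstI s x := firstI_append x hx
      refine Prod.ext ?_ ?_
      · show (if _ then _ else _) = _
        rw [if_pos hcont]
        apply dict_ext
        rw [hitems]
        show _ = (PySem.List.dedup (s ++ [x])).map _
        rw [dedup_append_singleton, if_pos hx]
        apply List.map_congr_left
        intro c hc
        rw [firstI_append x ((PySem.List.mem_dedup s c).mp hc)]
      · show stepMin _ _ = stepMin _ _
        rw [hgd, hfx]
        norm_num
    · have hcont : (PySem.Dict.mk ((PySem.List.dedup s).map (fun c => (c, firstI s c)))).contains x = false := by
        rw [← Bool.not_eq_true, PySem.Dict.contains_iff_mem_keys, hkeys]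
        exact fun hm => hx ((PySem.List.mem_dedup s x).mp hm)
      have hfx : firstI (s ++ [x]) x = (s.length : Int) := firstI_append_new hx
      have hgd : ∀ dflt : Int,
          (PySem.Dict.mk ((PySem.List.dedup s).map (fun c => (c, firstI s c)))).getD x dflt = dflt :=
        fun dflt => PySem.Dict.getD_of_not_contains _ _ hcont
      refine Prod.ext ?_ ?_
      · show (if _ then _ else _) = _
        rw [if_neg (by rw [hcont]; simp)]
        apply dict_ext
        rw [PySem.Dict.items_insert_of_not_contains _ _ hcont, hitems]
        show _ = (PySem.List.dedup (s ++ [x])).map _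
        rw [dedup_append_singleton, if_neg hx, List.map_append]
        congr 1
        · apply List.map_congr_left
          intro c hc
          rw [firstI_append x ((PySem.List.mem_dedup s c).mp hc)]
        · rw [List.map_singleton, hfx]
          norm_num
      · show stepMin _ _ = stepMin _ _
        rw [hgd, hfx]
        norm_num

theorem candLt_iff (a b : Int × Char × Int × Char) :
    candLt a b = true ↔ a.1 < b.1 ∨ (a.1 = b.1 ∧ (a.2.1 < b.2.1 ∨ (a.2.1 = b.2.1 ∧
      (a.2.2.1 < b.2.2.1 ∨ (a.2.2.1 = b.2.2.1 ∧ a.2.2.2 < b.2.2.2))))) := by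
  simp [candLt]

theorem candLt_trans {a b c : Int × Char × Int × Char}
    (h1 : candLt a b = true) (h2 : candLt b c = true) : candLt a c = true := by
  rw [candLt_iff] at h1 h2 ⊢
  rcases h1 with h | ⟨e1, hr1⟩
  · rcases h2 with hq | ⟨e1q, _⟩
    · exact Or.inl (lt_trans h hq)
    · exact Or.inl (h.trans_eq e1q)
  · rcases h2 with hq | ⟨e1q, hr2⟩
    · exact Or.inl (e1.trans_lt hq)
    · refine Or.inr ⟨e1.trans e1q, ?_⟩
      rcases hr1 with h | ⟨e2, hs1⟩
      · rcases hr2 with hq | ⟨e2q, _⟩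
        · exact Or.inl (lt_trans h hq)
        · exact Or.inl (h.trans_eq e2q)
      · rcases hr2 with hq | ⟨e2q, hs2⟩
        · exact Or.inl (e2.trans_lt hq)
        · refine Or.inr ⟨e2.trans e2q, ?_⟩
          rcases hs1 with h | ⟨e3, ht1⟩
          · rcases hs2 with hq | ⟨e3q, _⟩
            · exact Or.inl (lt_trans h hq)
            · exact Or.inl (h.trans_eq e3q)
          · rcases hs2 with hq | ⟨e3q, ht2⟩
            · exact Or.inl (e3.trans_lt hq)
            · exact Or.inr ⟨e3.trans e3q, lt_trans ht1 ht2⟩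

theorem candLt_total {a b : Int × Char × Int × Char} (h : a ≠ b) :
    candLt a b = true ∨ candLt b a = true := by
  obtain ⟨a1, a2, a3, a4⟩ := a
  obtain ⟨b1, b2, b3, b4⟩ := b
  rw [candLt_iff, candLt_iff]
  dsimp only
  rcases lt_trichotomy a1 b1 with h1 | h1 | h1
  · exact Or.inl (Or.inl h1)
  · subst h1
    rcases lt_trichotomy a2 b2 with h2 | h2 | h2
    · exact Or.inl (Or.inr ⟨rfl, Or.inl h2⟩)
    · subst h2
      rcases lt_trichotomy a3 b3 with h3 | h3 | h3
      · exact Or.inl (Or.inr ⟨rfl, Or.inr ⟨rfl, Or.inl h3⟩⟩)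
      · subst h3
        rcases lt_trichotomy a4 b4 with h4 | h4 | h4
        · exact Or.inl (Or.inr ⟨rfl, Or.inr ⟨rfl, Or.inr ⟨rfl, h4⟩⟩⟩)
        · subst h4; exact absurd rfl h
        · exact Or.inr (Or.inr ⟨rfl, Or.inr ⟨rfl, Or.inr ⟨rfl, h4⟩⟩⟩)
      · exact Or.inr (Or.inr ⟨rfl, Or.inr ⟨rfl, Or.inl h3⟩⟩)
    · exact Or.inr (Or.inr ⟨rfl, Or.inl h2⟩)
  · exact Or.inr (Or.inl h1)

theorem min_fold_cand :
    ∀ (l : List (Int × Char × Int × Char)) (a m : Int × Char × Int × Char),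
      (a :: l).Nodup → l.foldl stepMin (some a) = some m →
      (m = a ∨ m ∈ l) ∧ ∀ x, (x = a ∨ x ∈ l) → x ≠ m → candLt m x = true := by
  intro l
  induction l with
  | nil =>
    intro a m _ hfold
    rw [List.foldl_nil] at hfold
    have hma : m = a := Option.some_inj.mp hfold.symm
    subst hma
    refine ⟨Or.inl rfl, ?_⟩
    rintro x (rfl | hx) hne
    · exact absurd rfl hne
    · simp at hx
  | cons b t ih =>
    intro a m hnd hfold
    rw [List.foldl_cons] at hfold
    have hab : a ≠ b := fun e => (List.nodup_cons.mp hnd).1 (e ▸ List.mem_cons_self)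
    by_cases hlt : candLt b a = true
    · rw [show stepMin (some a) b = some b by simp [stepMin, hlt]] at hfold
      obtain ⟨hm, hall⟩ := ih b m (List.nodup_cons.mp hnd).2 hfold
      refine ⟨Or.inr ?_, ?_⟩
      · rcases hm with rfl | hmt
        · exact List.mem_cons_self
        · exact List.mem_cons_of_mem _ hmt
      · rintro x (rfl | hx) hne
        · by_cases hmb : m = b
          · subst hmb; exact hlt
          · exact candLt_trans (hall b (Or.inl rfl) (fun e => hmb e.symm)) hlt
        · rcases List.mem_cons.mp hx with rfl | hxt
          · exact hall x (Or.inl rfl) hne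
          · exact hall x (Or.inr hxt) hne
    · rw [show stepMin (some a) b = some a by simp [stepMin, hlt]] at hfold
      have hnd2 : (a :: t).Nodup := by
        have h1 := List.nodup_cons.mp hnd
        exact List.nodup_cons.mpr
          ⟨fun hmem => h1.1 (List.mem_cons_of_mem _ hmem), (List.nodup_cons.mp h1.2).2⟩
      obtain ⟨hm, hall⟩ := ih a m hnd2 hfold
      have hab2 : candLt a b = true := by
        rcases candLt_total hab with h | h
        · exact h
        · exact absurd h hlt
      refine ⟨?_, ?_⟩
      · rcases hm with rfl | hmt
        · exact Or.inl rfl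
        · exact Or.inr (List.mem_cons_of_mem _ hmt)
      · rintro x (rfl | hx) hne
        · exact hall x (Or.inl rfl) hne
        · rcases List.mem_cons.mp hx with rfl | hxt
          · rcases hm with rfl | hmt
            · exact hab2
            · have hma : m ≠ a := fun e => (List.nodup_cons.mp hnd2).1 (e ▸ hmt)
              exact candLt_trans (hall a (Or.inl rfl) (fun e => hma e.symm)) hab2
          · exact hall x (Or.inr hxt) hne

theorem cands_nodup (s : List Char) : (cands s).Nodup := by
  unfold cands
  refine List.pairwise_map.mpr (List.Pairwise.imp ?_ (PySem.List.pairwise_lt_enumerate _ _))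
  intro p q hpq he
  have h3 : firstI s p.2 = firstI s q.2 := congrArg (fun y => y.2.2.1) he
  have h1 : firstI s p.2 - p.1 = firstI s q.2 - q.1 := congrArg (fun y => y.1) he
  omega

theorem keyCand_mem_cands {s : List Char} {c : Char} (h : c ∈ s) :
    keyCand s c ∈ cands s := by
  obtain ⟨jl, hjl, hlast, _⟩ := lastI_spec h
  obtain ⟨hjlen, hjget⟩ := mem_posN.mp hjl
  have hjel : s[jl] = c := (List.getElem?_eq_some_iff.mp hjget).2
  unfold cands keyCand
  apply List.mem_map.mpr
  refine ⟨((0 : Int) + (jl : Int), s[jl]), ?_, ?_⟩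
  · exact (PySem.List.mem_enumerate_iff _ _ _).mpr ⟨jl, hjlen, rfl⟩
  · rw [hjel]
    simp [hlast]

theorem mem_cands {s : List Char} {x : Int × Char × Int × Char} (h : x ∈ cands s) :
    ∃ (k : Nat), k ∈ posN s x.2.2.2 ∧
      x = (firstI s x.2.2.2 - (k : Int), PySem.Chars.lowerChar x.2.2.2, firstI s x.2.2.2, x.2.2.2) := by
  unfold cands at h
  obtain ⟨p, hp, rfl⟩ := List.mem_map.mp h
  obtain ⟨k, hklt, rfl⟩ := (PySem.List.mem_enumerate_iff _ _ _).mp hp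
  refine ⟨k, ?_, ?_⟩
  · exact mem_posN.mpr ⟨hklt, List.getElem?_eq_getElem hklt⟩
  · simp

-- B's minimum is the key of some char, and beats the key of every other char
theorem minB_char {s : List Char} {m : Int × Char × Int × Char}
    (hmin : minF (cands s) = some m) :
    m.2.2.2 ∈ s ∧ m = keyCand s m.2.2.2 ∧
      ∀ c ∈ s, c ≠ m.2.2.2 → candLt m (keyCand s c) = true := by
  have hnd := cands_nodup s
  -- unpack the fold
  obtain ⟨a, t, hc, hm, hall⟩ :
      ∃ a t, cands s = a :: t ∧ (m = a ∨ m ∈ t) ∧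
        (∀ x, (x = a ∨ x ∈ t) → x ≠ m → candLt m x = true) := by
    cases hc : cands s with
    | nil => rw [hc] at hmin; simp [minF] at hmin
    | cons a t =>
      rw [hc] at hmin
      unfold minF at hmin
      rw [List.foldl_cons] at hmin
      rw [show stepMin none a = some a from rfl] at hmin
      obtain ⟨hm, hall⟩ := min_fold_cand t a m (hc ▸ hnd) hmin
      exact ⟨a, t, rfl, hm, hall⟩
  have hmem : m ∈ cands s := by
    rw [hc]
    rcases hm with rfl | hmt
    · exact List.mem_cons_self
    · exact List.mem_cons_of_mem _ hmt
  obtain ⟨k, hk, hxeq⟩ := mem_cands hmem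
  have hc0 : m.2.2.2 ∈ s := by
    obtain ⟨_, hg⟩ := mem_posN.mp hk
    exact List.mem_of_getElem? hg
  obtain ⟨jl, hjl, hlast, hmax⟩ := lastI_spec hc0
  have hkjl : k ≤ jl := hmax k hk
  have hkey : m = keyCand s m.2.2.2 := by
    by_contra hne
    have hkmem : keyCand s m.2.2.2 ∈ cands s := keyCand_mem_cands hc0
    have hlt : candLt m (keyCand s m.2.2.2) = true := by
      apply hall (keyCand s m.2.2.2) _ (fun e => hne e.symm)
      rw [hc] at hkmem
      rcases List.mem_cons.mp hkmem with h | h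
      · exact Or.inl h
      · exact Or.inr h
    rw [candLt_iff] at hlt
    have hm1 : m.1 = firstI s m.2.2.2 - (k : Int) := by rw [hxeq]
    have hk1 : (keyCand s m.2.2.2).1 = firstI s m.2.2.2 - (jl : Int) := by
      unfold keyCand
      dsimp only
      rw [hlast]
    rcases hlt with h | ⟨e1, hrest⟩
    · rw [hm1, hk1] at h; omega
    · -- equal first components force k = jl, hence m = keyCand
      rw [hm1, hk1] at e1
      have : k = jl := by omega
      subst this
      apply hne
      rw [hxeq]
      unfold keyCand
      rw [hlast]
  refine ⟨hc0, hkey, ?_⟩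
  intro c hcs hne
  have hkm : keyCand s c ∈ cands s := keyCand_mem_cands hcs
  have hnem : keyCand s c ≠ m := by
    intro e
    apply hne
    have := congrArg (fun y => y.2.2.2) e
    simpa [keyCand] using this
  apply hall (keyCand s c) _ hnem
  rw [hc] at hkm
  rcases List.mem_cons.mp hkm with h | h
  · exact Or.inl h
  · exact Or.inr h

-- the key comparison of two distinct chars is exactly A's "beats" relation
theorem candLt_keyCand_iff {s : List Char} {a b : Char} (ha : a ∈ s) (hb : b ∈ s)
    (hab : a ≠ b) : candLt (keyCand s a) (keyCand s b) = true ↔ KltP s a b := by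
  have hfne : firstI s a ≠ firstI s b := fun e => hab (firstI_inj ha hb e)
  rw [candLt_iff]
  unfold keyCand KltP tb spanOf
  dsimp only
  constructor
  · rintro (h | ⟨e1, (h | ⟨e2, (h | ⟨e3, _⟩)⟩)⟩)
    · exact Or.inl (by omega)
    · exact Or.inr ⟨by omega, Or.inl h⟩
    · exact Or.inr ⟨by omega, Or.inr ⟨e2, h⟩⟩
    · exact absurd e3 hfne
  · rintro (h | ⟨e1, (h | ⟨e2, h⟩)⟩)
    · exact Or.inl (by omega)
    · exact Or.inr ⟨by omega, Or.inl h⟩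
    · exact Or.inr ⟨by omega, Or.inr ⟨e2, Or.inl h⟩⟩

theorem KltP_asymm {s : List Char} {a b : Char} (h1 : KltP s a b) (h2 : KltP s b a) :
    False := by
  rcases h1 with h1 | ⟨e1, ht1⟩ <;> rcases h2 with h2 | ⟨e2, ht2⟩
  · omega
  · omega
  · omega
  · exact tb_asymm ht1 ht2

theorem minF_isSome {l : List (Int × Char × Int × Char)} (h : l ≠ []) :
    ∃ m, minF l = some m := by
  suffices haux : ∀ (t : List (Int × Char × Int × Char)) (a : Int × Char × Int × Char),
      ∃ m, t.foldl stepMin (some a) = some m by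
    cases l with
    | nil => exact absurd rfl h
    | cons a t =>
      unfold minF
      rw [List.foldl_cons, show stepMin none a = some a from rfl]
      exact haux t a
  intro t
  induction t with
  | nil => exact fun a => ⟨a, rfl⟩
  | cons b t ih =>
    intro a
    rw [List.foldl_cons]
    by_cases hlt : candLt b a = true
    · rw [show stepMin (some a) b = some b by simp [stepMin, hlt]]
      exact ih b
    · rw [show stepMin (some a) b = some a by simp [stepMin, hlt]]
      exact ih a

-- B's port, reduced: the char component of the minimum candidate
theorem altB (strInput : String) :
    mostValue_alt strInput = match minF (cands strInput.toList) with
      | some b => String.ofList [b.2.2.2]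
      | none => "" := by
  unfold mostValue_alt
  dsimp only
  rw [show (fun (st : PySem.Dict Char Int × Option (Int × Char × Int × Char)) (p : Int × Char) =>
      let f := st.1.getD p.2 p.1
      let d := if st.1.contains p.2 then st.1 else st.1.insert p.2 p.1
      let cand := (f - p.1, PySem.Chars.lowerChar p.2, f, p.2)
      let best := match st.2 with
        | none => some cand
        | some b => if candLt cand b then some cand else some b
      (d, best)) = stepB from rfl]
  rw [foldB]

-- ===== VERDICT (by name: the statement is the Claim_ definition above) =====
theorem mostValue_spec : Claim_equal_mostValue := by
  intro strInput hdom hpre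
  unfold Spec_mostValue
  have hs : strInput.toList ≠ [] := by
    intro hl
    exact hpre (String.toList_eq_nil_iff.mp hl)
  rw [A_reduce, altB]
  have hdne : PySem.List.dedup strInput.toList ≠ [] := by
    cases hsl : strInput.toList with
    | nil => exact absurd hsl hs
    | cons a t =>
      exact List.ne_nil_of_mem ((PySem.List.mem_dedup _ a).mpr List.mem_cons_self)
  have hLne : PySem.List.sorted (PySem.List.dedup strInput.toList)
      PySem.Chars.lowerChar false ≠ [] := by
    intro h
    exact hdne ((PySem.List.sorted_eq_nil_iff _ _ _).mp h)
  obtain ⟨mA, hmA⟩ : ∃ mA, PySem.List.max?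
      (PySem.List.sorted (PySem.List.dedup strInput.toList) PySem.Chars.lowerChar false)
      (fun c => spanOf strInput.toList c) = some mA := by
    cases h : PySem.List.max?
        (PySem.List.sorted (PySem.List.dedup strInput.toList) PySem.Chars.lowerChar false)
        (fun c => spanOf strInput.toList c) with
    | none => exact absurd ((PySem.List.max?_eq_none_iff _ _).mp h) hLne
    | some mA => exact ⟨mA, rfl⟩
  have hcne : cands strInput.toList ≠ [] := by
    intro h
    apply hs
    have hlen := congrArg List.length h
    simp only [cands, List.length_map, PySem.List.length_enumerate, List.length_nil] at hlen
    exact List.length_eq_zero_iff.mp hlen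
  obtain ⟨m, hm⟩ := minF_isSome hcne
  rw [hmA, hm]
  obtain ⟨hmemA, hallA⟩ := maxA_char
    (sorted_pairwise_tb strInput.toList _ (dedup_pairwise_firstI strInput.toList)) hmA
  obtain ⟨hc0s, hkey, hbeats⟩ := minB_char hm
  have hmAs : mA ∈ strInput.toList :=
    (PySem.List.mem_dedup _ mA).mp ((PySem.List.mem_sorted _ _ _ _).mp hmemA)
  have he : mA = m.2.2.2 := by
    by_contra hne
    have h1 : KltP strInput.toList mA m.2.2.2 := hallA m.2.2.2
      ((PySem.List.mem_sorted _ _ _ _).mpr ((PySem.List.mem_dedup _ _).mpr hc0s))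
      (fun e => hne e.symm)
    have h2 : candLt m (keyCand strInput.toList mA) = true := hbeats mA hmAs hne
    rw [hkey] at h2
    have h3 : KltP strInput.toList m.2.2.2 mA :=
      (candLt_keyCand_iff hc0s hmAs (fun e => hne e.symm)).mp h2
    exact KltP_asymm h1 h3
  rw [he]
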